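-- pv_equiv track=rewrite | github.com/dh7hong/algorithms-level-facebook | 160_moving.py | solution
-- ===== SOURCE A (Python) =====
-- def solution(s):
--     result = []
--
--     for x in s:
--         stack = []
--         count_110 = 0
--
--         # Step 1: Remove all "110"
--         for ch in x:
--             stack.append(ch)
--             if len(stack) >= 3 and stack[-3:] == ['1', '1', '0']:
--                 stack.pop()
--                 stack.pop()
--                 stack.pop()
--                 count_110 += 1
--
--         # Remaining string
--         remaining = ''.join(stack)
--
--         # Step 2: Find insertion point
--         insert_idx = remaining.rfind('0')
--
--         # Step 3: Insert all "110"
--         if insert_idx == -1: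
--             new_str = "110" * count_110 + remaining
--         else:
--             new_str = (
--                 remaining[:insert_idx + 1] +
--                 "110" * count_110 +
--                 remaining[insert_idx + 1:]
--             )
--
--         result.append(new_str)
--
--     return result
-- ===== SOURCE B (Python) =====
-- def solution(s):
--     result = []
--
--     for x in s:
--         settled = []       # characters that can no longer take part in a "110" removal
--         ones = 0           # number of trailing, not-yet-settled '1's
--         count_110 = 0
--
--         # Step 1: remove all "110" by counting the trailing run of '1's
--         for ch in x:
--             if ch == '1':
--                 ones += 1
--             elif ch == '0':
--                 if ones >= 2:
--                     ones -= 2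
--                     count_110 += 1
--                 else:
--                     settled.append('1' * ones)
--                     settled.append('0')
--                     ones = 0
--             else:
--                 settled.append('1' * ones)
--                 settled.append(ch)
--                 ones = 0
--         settled.append('1' * ones)
--         remaining = ''.join(settled)
--
--         # Step 2: find insertion point
--         insert_idx = remaining.rfind('0')
--
--         # Step 3: insert all "110"
--         if insert_idx == -1:
--             new_str = "110" * count_110 + remaining
--         else:
--             new_str = (
--                 remaining[:insert_idx + 1] +
--                 "110" * count_110 +
--                 remaining[insert_idx + 1:]
--             )
--
--         result.append(new_str)
--
--     return result
-- ===== Notes on version B (the rewrite author's own statement) =====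
-- stated objective: alternative
-- what changed: Replaces the character stack with triple pop-and-compare of the last three elements by a settled-output list plus an integer counter of trailing unsettled '1's: a '0' either cancels two counted '1's or flushes the run, so no suffix comparison or popping ever happens.
import Mathlib
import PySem

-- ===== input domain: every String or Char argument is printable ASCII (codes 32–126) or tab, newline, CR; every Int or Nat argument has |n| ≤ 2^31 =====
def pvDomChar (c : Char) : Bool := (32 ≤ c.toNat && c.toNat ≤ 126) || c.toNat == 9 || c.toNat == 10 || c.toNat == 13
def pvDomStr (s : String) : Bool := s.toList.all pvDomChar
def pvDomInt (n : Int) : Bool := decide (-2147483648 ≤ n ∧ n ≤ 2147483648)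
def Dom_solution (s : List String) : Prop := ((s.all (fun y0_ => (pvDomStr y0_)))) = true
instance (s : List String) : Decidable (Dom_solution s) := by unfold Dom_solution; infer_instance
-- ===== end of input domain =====

-- B replaces A's explicit character stack (append + compare/pop of the last three)
-- by a settled-output list plus a counter of trailing unsettled '1's; objective: alternative.

-- ===== PORT A =====
-- one step of A's inner loop: append ch, then pop '1','1','0' off the end if present
def stepA (st : List Char × Int) (ch : Char) : List Char × Int :=
  let stack := st.1 ++ [ch]
  if 3 ≤ stack.length ∧ stack.drop (stack.length - 3) = ['1', '1', '0'] then
    (stack.take (stack.length - 3), st.2 + 1)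
  else
    (stack, st.2)

-- A's body for one string x
def procA (x : String) : String :=
  let r := x.toList.foldl stepA ([], 0)
  let remaining := r.1
  let count110 := r.2
  let insertIdx := PySem.Chars.rfind remaining ['0']
  if insertIdx = -1 then
    String.ofList (PySem.List.pyRepeat ['1', '1', '0'] count110 ++ remaining)
  else
    String.ofList (PySem.List.slice remaining none (some (insertIdx + 1)) ++
      PySem.List.pyRepeat ['1', '1', '0'] count110 ++
      PySem.List.slice remaining (some (insertIdx + 1)) none)

def solution (s : List String) : List String :=
  s.foldl (fun result x => result ++ [procA x]) []

-- ===== PORT B =====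
-- one step of B's inner loop over (settled, ones, count_110)
def stepB (st : List Char × Nat × Int) (ch : Char) : List Char × Nat × Int :=
  if ch = '1' then (st.1, st.2.1 + 1, st.2.2)
  else if ch = '0' then
    if 2 ≤ st.2.1 then (st.1, st.2.1 - 2, st.2.2 + 1)
    else (st.1 ++ List.replicate st.2.1 '1' ++ ['0'], 0, st.2.2)
  else (st.1 ++ List.replicate st.2.1 '1' ++ [ch], 0, st.2.2)

-- B's body for one string x
def procB (x : String) : String :=
  let r := x.toList.foldl stepB ([], 0, 0)
  let remaining := r.1 ++ List.replicate r.2.1 '1'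
  let count110 := r.2.2
  let insertIdx := PySem.Chars.rfind remaining ['0']
  if insertIdx = -1 then
    String.ofList (PySem.List.pyRepeat ['1', '1', '0'] count110 ++ remaining)
  else
    String.ofList (PySem.List.slice remaining none (some (insertIdx + 1)) ++
      PySem.List.pyRepeat ['1', '1', '0'] count110 ++
      PySem.List.slice remaining (some (insertIdx + 1)) none)

def solution_alt (s : List String) : List String :=
  s.map procB

-- ===== PRECONDITION & SPEC =====
def Spec_solution (s : List String) (out : List String) : Prop := out = solution_alt s
instance (s : List String) (out : List String) : Decidable (Spec_solution s out) := by unfold Spec_solution; infer_instance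

-- ===== CLAIM (what is proved, stated in full; the proofs are below) =====
def Claim_equal_solution : Prop := ∀ (s : List String), Dom_solution s → Spec_solution s (solution s)

-- ===== LEMMAS AND PROOFS =====

-- A's pop condition holds iff the stack ends with '1','1','0'
theorem condA_iff (l : List Char) :
    (3 ≤ l.length ∧ l.drop (l.length - 3) = ['1', '1', '0']) ↔
      ∃ p, l = p ++ ['1', '1', '0'] := by
  constructor
  · rintro ⟨h3, hd⟩
    refine ⟨l.take (l.length - 3), ?_⟩
    conv_lhs => rw [← List.take_append_drop (l.length - 3) l, hd]
  · rintro ⟨p, rfl⟩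
    refine ⟨by simp, ?_⟩
    have h : (p ++ ['1', '1', '0']).length - 3 = p.length := by simp
    rw [h]
    simp

-- splitting off the last two '1's of a run of at least two
theorem rep_split (ones : Nat) (h : 2 ≤ ones) :
    List.replicate ones ('1' : Char) = List.replicate (ones - 2) '1' ++ ['1', '1'] := by
  have h2 : ones = (ones - 2) + 2 := by omega
  rw [h2, List.replicate_add]
  rfl

-- the key invariant: A's stack is B's settled output followed by the counted run of '1's
theorem loop_eq (cs : List Char) :
    ∀ (settled : List Char) (ones : Nat) (count : Int),
      settled.getLast? ≠ some '1' →
      cs.foldl stepA (settled ++ List.replicate ones '1', count) =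
        (let r := cs.foldl stepB (settled, ones, count)
         (r.1 ++ List.replicate r.2.1 '1', r.2.2)) := by
  induction cs with
  | nil => intro settled ones count _; simp
  | cons ch rest ih =>
    intro settled ones count hlast
    simp only [List.foldl_cons]
    by_cases h1 : ch = '1'
    · subst h1
      have hA : stepA (settled ++ List.replicate ones '1', count) '1' =
          (settled ++ List.replicate (ones + 1) '1', count) := by
        simp only [stepA]
        rw [if_neg]
        · simp [List.replicate_succ']
        · rw [condA_iff]
          rintro ⟨p, hp⟩
          have := congrArg List.getLast? hp
          simp at this
      rw [hA, stepB]
      exact ih settled (ones + 1) count hlast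
    · by_cases h0 : ch = '0'
      · subst h0
        by_cases h2 : 2 ≤ ones
        · have hsplit : settled ++ List.replicate ones '1' ++ ['0'] =
              (settled ++ List.replicate (ones - 2) '1') ++ ['1', '1', '0'] := by
            rw [rep_split ones h2]
            simp
          have hcond : 3 ≤ (settled ++ List.replicate ones '1' ++ ['0']).length ∧
              (settled ++ List.replicate ones '1' ++ ['0']).drop
                ((settled ++ List.replicate ones '1' ++ ['0']).length - 3) = ['1', '1', '0'] := by
            rw [condA_iff]
            exact ⟨settled ++ List.replicate (ones - 2) '1', hsplit⟩
          have hA : stepA (settled ++ List.replicate ones '1', count) '0' =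
              (settled ++ List.replicate (ones - 2) '1', count + 1) := by
            simp only [stepA]
            rw [if_pos hcond, hsplit]
            have hl : ((settled ++ List.replicate (ones - 2) '1') ++ ['1', '1', '0']).length - 3 =
                (settled ++ List.replicate (ones - 2) '1').length := by
              simp
              omega
            rw [hl, List.take_left]
          rw [hA, stepB]
          simp only [if_neg (by decide : ¬ ('0' : Char) = '1'), if_pos h2]
          exact ih settled (ones - 2) (count + 1) hlast
        · -- ones ≤ 1: the '0' settles the run
          have hA : stepA (settled ++ List.replicate ones '1', count) '0' =
              ((settled ++ List.replicate ones '1' ++ ['0']) ++ List.replicate 0 '1', count) := by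
            simp only [stepA]
            rw [if_neg]
            · simp
            · rw [condA_iff]
              rintro ⟨p, hp⟩
              apply hlast
              interval_cases ones
              · have hp' : settled ++ ['0'] = (p ++ ['1', '1']) ++ ['0'] := by
                  simpa using hp
                have h' : settled = p ++ ['1', '1'] := by
                  have := congrArg List.dropLast hp'
                  rwa [List.dropLast_concat, List.dropLast_concat] at this
                rw [h']
                simp
              · have h' : settled = p ++ ['1'] := by
                  have ha := congrArg List.dropLast
                    (show (settled ++ ['1']) ++ ['0'] = ((p ++ ['1']) ++ ['1']) ++ ['0'] by
                      simpa using hp)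
                  rw [List.dropLast_concat, List.dropLast_concat] at ha
                  have hb := congrArg List.dropLast ha
                  rwa [List.dropLast_concat, List.dropLast_concat] at hb
                rw [h']
                simp
          rw [hA, stepB]
          simp only [if_neg (by decide : ¬ ('0' : Char) = '1'),
            if_neg (by omega : ¬ 2 ≤ ones)]
          apply ih
          simp
      · -- any other character settles the run
        have hA : stepA (settled ++ List.replicate ones '1', count) ch =
            ((settled ++ List.replicate ones '1' ++ [ch]) ++ List.replicate 0 '1', count) := by
          simp only [stepA]
          rw [if_neg]
          · simp
          · rw [condA_iff]
            rintro ⟨p, hp⟩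
            have := congrArg List.getLast? hp
            simp at this
            exact h0 this
        rw [hA, stepB]
        simp only [if_neg h1, if_neg h0]
        apply ih
        simp [h1]

theorem procA_eq_procB (x : String) : procA x = procB x := by
  unfold procA procB
  have h := loop_eq x.toList [] 0 0 (by simp)
  simp only [List.replicate_zero, List.append_nil] at h
  rw [h]

theorem foldl_append_eq_map (s : List String) :
    s.foldl (fun result x => result ++ [procA x]) [] = s.map procA := by
  have h : ∀ (t : List String) (acc : List String),
      t.foldl (fun result x => result ++ [procA x]) acc = acc ++ t.map procA := by
    intro t
    induction t with
    | nil => simp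
    | cons a u ih => intro acc; simp [ih]
  simpa using h s []

-- ===== VERDICT (by name: the statement is the Claim_ definition above) =====
theorem solution_spec : Claim_equal_solution := by
  intro s _
  unfold Spec_solution solution solution_alt
  rw [foldl_append_eq_map]
  exact List.map_congr_left fun x _ => procA_eq_procB x
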